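-- pv_equiv track=rewrite | github.com/GeoHaber/ZEN_AI_RAG | server/helpers.py | tokenize_for_stream
-- ===== SOURCE A (Python) =====
-- from typing import Dict, List, Optional
--
-- def tokenize_for_stream(text: str) -> List[str]:
--     """Fallback: split text into token-like chunks for fake streaming."""
--     tokens = []
--     current = []
--     for ch in text:
--         current.append(ch)
--         if ch in (" ", "\n", ".", ",", ";", "!", "?", ":", ")", "]", "}"):
--             tokens.append("".join(current))
--             current = []
--         elif len(current) >= 5:
--             tokens.append("".join(current))
--             current = []
--     if current:
--         tokens.append("".join(current))
--     return tokens
-- ===== SOURCE B (Python) =====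
-- DELIMS = frozenset(" \n.,;!?:)]}")
--
-- def tokenize_for_stream(text):
--     """Fallback: split text into token-like chunks for fake streaming.
--
--     Two-pointer scan over the string with slicing: each chunk runs until a
--     delimiter (included) or until it is 5 characters long.
--     """
--     tokens = []
--     i = 0
--     n = len(text)
--     while i < n:
--         k = i
--         while k < n and k - i < 5 and text[k] not in DELIMS:
--             k += 1
--         if k < n and k - i < 5:  # stopped at a delimiter: include it
--             k += 1
--         tokens.append(text[i:k])
--         i = k
--     return tokens
-- ===== Notes on version B (the rewrite author's own statement) =====
-- stated objective: faster
-- what changed: Replaced the character-accumulation loop (append each char to a buffer list, flush via ''.join on delimiter or length 5) with a two-pointer scan that slices each chunk directly out of the string, avoiding the per-character list appends and joins.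
import Mathlib
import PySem

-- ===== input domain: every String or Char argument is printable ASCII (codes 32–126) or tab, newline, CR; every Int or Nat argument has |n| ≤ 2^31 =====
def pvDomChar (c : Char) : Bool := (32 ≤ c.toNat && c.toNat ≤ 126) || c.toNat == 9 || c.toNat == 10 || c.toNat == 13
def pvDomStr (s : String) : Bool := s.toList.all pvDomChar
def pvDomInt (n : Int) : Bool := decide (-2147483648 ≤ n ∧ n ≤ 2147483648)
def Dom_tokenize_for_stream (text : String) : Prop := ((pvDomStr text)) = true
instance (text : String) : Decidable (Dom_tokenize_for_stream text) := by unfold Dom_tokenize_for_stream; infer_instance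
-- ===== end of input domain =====

-- B replaces A's buffer-accumulation loop by a two-pointer chunk scanner (alternative decomposition, same cost).

-- shared delimiter test (Python: ch in (" ", "\n", ".", ",", ";", "!", "?", ":", ")", "]", "}"))
def pvIsDelim (c : Char) : Bool :=
  c == ' ' || c == '\n' || c == '.' || c == ',' || c == ';' || c == '!' ||
  c == '?' || c == ':' || c == ')' || c == ']' || c == '}'

-- ===== PORT A =====
-- loop body: append ch to current; flush on delimiter or when len(current) >= 5
def tfsStep (st : List String × List Char) (ch : Char) : List String × List Char :=
  let cur := st.2 ++ [ch]
  if pvIsDelim ch then (st.1 ++ [String.mk cur], [])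
  else if 5 ≤ cur.length then (st.1 ++ [String.mk cur], [])
  else (st.1, cur)

def tokenize_for_stream (text : String) : List String :=
  let st := text.toList.foldl tfsStep ([], [])
  if st.2 ≠ [] then st.1 ++ [String.mk st.2] else st.1

-- ===== PORT B =====
-- inner while of Source B: consume up to n chars, stopping after a delimiter (included)
def tfsTake : List Char → Nat → List Char × List Char
  | l, 0 => ([], l)
  | [], _ + 1 => ([], [])
  | c :: rest, n + 1 =>
    if pvIsDelim c then ([c], rest)
    else
      let p := tfsTake rest n
      (c :: p.1, p.2)

theorem tfsTake_snd_le : ∀ (l : List Char) (n : Nat), (tfsTake l n).2.length ≤ l.length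
  | _, 0 => by simp [tfsTake]
  | [], _ + 1 => by simp [tfsTake]
  | c :: rest, n + 1 => by
    simp only [tfsTake]
    split
    · simp
    · simpa using Nat.le_succ_of_le (tfsTake_snd_le rest n)

theorem tfsTake_cons_snd_lt (c : Char) (rest : List Char) (n : Nat) :
    (tfsTake (c :: rest) (n + 1)).2.length < (c :: rest).length := by
  simp only [tfsTake]
  split
  · simp
  · simpa using Nat.lt_succ_of_le (tfsTake_snd_le rest n)

-- outer while of Source B: emit chunks until the text is exhausted
def tfsChunks : List Char → List String
  | [] => []
  | c :: rest =>
    let p := tfsTake (c :: rest) 5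
    String.mk p.1 :: tfsChunks p.2
termination_by l => l.length
decreasing_by exact tfsTake_cons_snd_lt c rest 4

def tokenize_for_stream_alt (text : String) : List String :=
  tfsChunks text.toList

-- ===== PRECONDITION & SPEC =====
def Spec_tokenize_for_stream (text : String) (out : List String) : Prop := out = tokenize_for_stream_alt text
instance (text : String) (out : List String) : Decidable (Spec_tokenize_for_stream text out) := by unfold Spec_tokenize_for_stream; infer_instance

-- ===== CLAIM (what is proved, stated in full; the proofs are below) =====
def Claim_equal_tokenize_for_stream : Prop := ∀ (text : String), Dom_tokenize_for_stream text → Spec_tokenize_for_stream text (tokenize_for_stream text)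

-- ===== LEMMAS AND PROOFS =====

theorem tfsTake_nil : ∀ (n : Nat), tfsTake [] n = ([], []) := by
  intro n; cases n <;> simp [tfsTake]

theorem tfsChunks_cons (c : Char) (rest : List Char) :
    tfsChunks (c :: rest) =
      String.mk (tfsTake (c :: rest) 5).1 :: tfsChunks (tfsTake (c :: rest) 5).2 := by
  rw [tfsChunks]

-- a delimiter-free buffer shorter than the budget is swallowed whole by tfsTake
theorem tfsTake_prefix : ∀ (cur : List Char) (n : Nat) (l : List Char),
    cur.length ≤ n → (∀ c ∈ cur, pvIsDelim c = false) →
    tfsTake (cur ++ l) n = (cur ++ (tfsTake l (n - cur.length)).1, (tfsTake l (n - cur.length)).2)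
  | [], n, l, _, _ => by simp
  | c :: cur', n + 1, l, hlen, hd => by
    have hc : pvIsDelim c = false := hd c (by simp)
    have ih := tfsTake_prefix cur' n l (by simpa using hlen)
      (fun x hx => hd x (by simp [hx]))
    simp only [List.cons_append, tfsTake, hc, Bool.false_eq_true, if_false, ih]
    simp [Nat.succ_sub_succ]

-- the main invariant: A's fold from buffer `cur` plus its final flush produces B's chunks of cur ++ l
theorem tfs_invariant : ∀ (l cur : List Char) (ts : List String),
    cur.length ≤ 4 → (∀ c ∈ cur, pvIsDelim c = false) →
    (let st := l.foldl tfsStep (ts, cur);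
     if st.2 ≠ [] then st.1 ++ [String.mk st.2] else st.1) = ts ++ tfsChunks (cur ++ l) := by
  intro l
  induction l with
  | nil =>
    intro cur ts hlen hd
    cases cur with
    | nil => simp [tfsChunks]
    | cons c cur' =>
      have htk := tfsTake_prefix (c :: cur') 5 [] (le_trans hlen (by omega)) hd
      rw [tfsTake_nil] at htk
      simp only [List.append_nil] at htk ⊢
      rw [tfsChunks_cons, htk]
      simp [tfsChunks]
  | cons ch rest ih =>
    intro cur ts hlen hd
    simp only [List.foldl_cons]
    by_cases hch : pvIsDelim ch = true
    · -- delimiter: A flushes cur ++ [ch]; B's chunk is cur ++ [ch]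
      have hstep : tfsStep (ts, cur) ch = (ts ++ [String.mk (cur ++ [ch])], []) := by
        simp [tfsStep, hch]
      rw [hstep, ih [] _ (by simp) (by simp)]
      have htk := tfsTake_prefix cur 5 (ch :: rest) (by omega) hd
      have hk : ∃ m, 5 - cur.length = m + 1 := ⟨4 - cur.length, by omega⟩
      obtain ⟨m, hm⟩ := hk
      rw [hm] at htk
      simp only [tfsTake, hch, if_true] at htk
      rw [show cur ++ ch :: rest = (cur ++ [ch]) ++ rest by simp, ] at htk ⊢
      rw [show (cur ++ [ch]) ++ rest = cur ++ ch :: rest by simp] at htk ⊢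
      cases hcr : cur ++ ch :: rest with
      | nil => simp at hcr
      | cons x xs =>
        rw [tfsChunks_cons, ← hcr, htk]
        simp
    · by_cases h5 : 5 ≤ (cur ++ [ch]).length
      · -- buffer reaches 5: A flushes; B's chunk is the 5 non-delimiters
        simp at h5
        have hstep : tfsStep (ts, cur) ch = (ts ++ [String.mk (cur ++ [ch])], []) := by
          simp [tfsStep, hch]; omega
        rw [hstep, ih [] _ (by simp) (by simp)]
        have htk := tfsTake_prefix cur 5 (ch :: rest) (by omega) hd
        rw [show 5 - cur.length = 1 by omega] at htk
        simp only [tfsTake, hch, Bool.false_eq_true, if_false] at htk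
        cases hcr : cur ++ ch :: rest with
        | nil => simp at hcr
        | cons x xs =>
          rw [tfsChunks_cons, ← hcr, htk]
          simp
      · -- buffer grows
        simp at h5
        have hstep : tfsStep (ts, cur) ch = (ts, cur ++ [ch]) := by
          simp [tfsStep, hch]; omega
        rw [hstep]
        have := ih (cur ++ [ch]) ts (by simp; omega)
          (by intro x hx; rcases (List.mem_append.mp hx) with h | h
              · exact hd x h
              · simp at h; simpa [h] using (by simpa using hch))
        simpa using this

-- ===== VERDICT (by name: the statement is the Claim_ definition above) =====
theorem tokenize_for_stream_spec : Claim_equal_tokenize_for_stream := by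
  intro text _
  unfold Spec_tokenize_for_stream tokenize_for_stream tokenize_for_stream_alt
  simpa using tfs_invariant text.toList [] [] (by simp) (by simp)
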